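-- pv_equiv track=rewrite | github.com/sumitalp/problems | algorithms/clouds_revisited.py | solveCloudRevisited
-- ===== SOURCE A (Python) =====
-- def solveCloudRevisited(c, n, k):
--     pos = 0
--     cnt = 0
--
--     while cnt == 0 or pos != 0:
--         pos += k
--         pos %= n
--         if c[pos] == 0:
--             cnt += 1
--         else:
--             cnt += 3
--
--     return 100 - cnt
-- ===== SOURCE B (Python) =====
-- def _gcd(a, b):
--     a = abs(a)
--     b = abs(b)
--     while b:
--         a, b = b, a % b
--     return a
--
--
-- def solveCloudRevisited(c, n, k):
--     # The walk 0, k, 2k, ... (mod n) visits exactly the multiples of gcd(n, k),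
--     # each once per cycle; sum the penalties directly over them.
--     g = _gcd(n, k)
--     total = 0
--     for i in range(0, n, g):
--         total += 1 if c[i] == 0 else 3
--     return 100 - total
-- ===== Notes on version B (the rewrite author's own statement) =====
-- stated objective: faster
-- what changed: B replaces A's hop-by-hop simulation of the circular walk by computing g = gcd(n, k) and summing the penalties directly over range(0, n, g), the set of positions the walk actually visits, each exactly once.
-- outside the precondition, e.g. on solveCloudRevisited([0, 1], -2, 1): A returns 96, B returns 100
import Mathlib
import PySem

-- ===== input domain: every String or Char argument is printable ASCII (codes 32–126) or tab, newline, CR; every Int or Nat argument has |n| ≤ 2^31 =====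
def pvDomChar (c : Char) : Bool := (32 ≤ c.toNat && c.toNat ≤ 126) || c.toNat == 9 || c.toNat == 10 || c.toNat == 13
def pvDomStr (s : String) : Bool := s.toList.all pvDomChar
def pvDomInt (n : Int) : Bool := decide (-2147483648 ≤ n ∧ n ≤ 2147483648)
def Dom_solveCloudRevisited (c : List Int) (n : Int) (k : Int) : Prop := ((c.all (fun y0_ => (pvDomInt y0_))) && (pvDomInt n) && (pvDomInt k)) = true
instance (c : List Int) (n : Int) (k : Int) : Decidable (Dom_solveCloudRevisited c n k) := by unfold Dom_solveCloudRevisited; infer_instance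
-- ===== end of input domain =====

-- B replaces A's step-by-step simulation of the circular walk by a direct sum over
-- the positions actually visited — the multiples of gcd(n, k) below n (objective: faster).

-- ===== PORT A =====
-- A's while loop as fuel recursion; on every input admitted by Pre_ the loop
-- stops after n / gcd(n,k) ≤ n iterations, so fuel n.toNat + 1 never runs out there.
def pvLoopA (c : List Int) (n k : Int) : Nat → Int → Int → Int
  | 0, _, cnt => cnt
  | fuel+1, pos, cnt =>
    let pos' := PySem.Int.mod (pos + k) n
    let cnt' := if PySem.List.pyGetD c pos' 0 = 0 then cnt + 1 else cnt + 3
    if pos' = 0 then cnt' else pvLoopA c n k fuel pos' cnt'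

def solveCloudRevisited (c : List Int) (n : Int) (k : Int) : Int :=
  100 - pvLoopA c n k (n.toNat + 1) 0 0

-- ===== PORT B =====
-- transliteration of Source B's hand-written Euclid helper _gcd (abs, then a, b = b, a % b)
def pvGcdAux : Nat → Nat → Nat
  | a, 0 => a
  | a, b+1 => pvGcdAux (b+1) (a % (b+1))
decreasing_by exact Nat.mod_lt _ (Nat.succ_pos b)

def pvGcd (a b : Int) : Int := (pvGcdAux a.natAbs b.natAbs : Int)

def solveCloudRevisited_alt (c : List Int) (n : Int) (k : Int) : Int :=
  let g := pvGcd n k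
  let total := (PySem.List.pyRange 0 n g).foldl
    (fun acc i => acc + (if PySem.List.pyGetD c i 0 = 0 then 1 else 3)) 0
  100 - total

-- ===== PRECONDITION & SPEC =====
-- Pre_ restricts to the natural domain n ≥ 1 with every visited index (the multiples of
-- gcd(n,k) below n, the largest being n - gcd(n,k)) inside c; it excludes n = 0 (A raises
-- ZeroDivisionError), too-short c (A raises IndexError), and n < 0, where A only returns a
-- value through Python's negative-index wraparound (outside the task's natural domain).
def Pre_solveCloudRevisited (c : List Int) (n : Int) (k : Int) : Prop :=
  1 ≤ n ∧ n - (Int.gcd n k : Int) + 1 ≤ (c.length : Int)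
instance (c : List Int) (n : Int) (k : Int) : Decidable (Pre_solveCloudRevisited c n k) := by
  unfold Pre_solveCloudRevisited; infer_instance

def pvWitness_solveCloudRevisited : List Int × Int × Int := ([0, 1], 2, 1)

def Spec_solveCloudRevisited (c : List Int) (n : Int) (k : Int) (out : Int) : Prop := out = solveCloudRevisited_alt c n k
instance (c : List Int) (n : Int) (k : Int) (out : Int) : Decidable (Spec_solveCloudRevisited c n k out) := by unfold Spec_solveCloudRevisited; infer_instance

-- ===== CLAIM (what is proved, stated in full; the proofs are below) =====
def Claim_equal_solveCloudRevisited : Prop := ∀ (c : List Int) (n : Int) (k : Int), Dom_solveCloudRevisited c n k → Pre_solveCloudRevisited c n k → Spec_solveCloudRevisited c n k (solveCloudRevisited c n k)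

-- ===== LEMMAS AND PROOFS =====

lemma pvGcdAux_eq (a b : Nat) : pvGcdAux a b = Nat.gcd b a := by
  induction a, b using pvGcdAux.induct with
  | case1 a => simp [pvGcdAux]
  | case2 a b ih => rw [pvGcdAux, ih, Nat.gcd_succ]

lemma pvGcd_eq (a b : Int) : pvGcd a b = (Int.gcd a b : Int) := by
  unfold pvGcd
  rw [pvGcdAux_eq]
  rw [Int.gcd, Nat.gcd_comm]

-- the key divisibility fact: n ∣ i * k ↔ (n / gcd n k) ∣ i  (for n ≠ 0)
lemma pv_dvd_key (n k i : Int) (hn : n ≠ 0) :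
    n ∣ i * k ↔ (n / (Int.gcd n k : Int)) ∣ i := by
  have hgpos : (0 : Int) < (Int.gcd n k : Int) := by
    exact_mod_cast Int.gcd_pos_iff.mpr (Or.inl hn)
  have hco : IsCoprime (n / (Int.gcd n k : Int)) (k / (Int.gcd n k : Int)) := by
    rw [Int.isCoprime_iff_gcd_eq_one]
    exact Int.gcd_div_gcd_div_gcd (Int.gcd_pos_iff.mpr (Or.inl hn))
  have hgn : (Int.gcd n k : Int) ∣ n := Int.gcd_dvd_left n k
  have hgk : (Int.gcd n k : Int) ∣ k := Int.gcd_dvd_right n k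
  set G : Int := (Int.gcd n k : Int) with hG
  clear_value G
  obtain ⟨m0, hm0⟩ := hgn
  obtain ⟨k0, hk0⟩ := hgk
  have hGne : G ≠ 0 := by omega
  have hm0' : n / G = m0 := by rw [hm0, Int.mul_ediv_cancel_left _ hGne]
  have hk0' : k / G = k0 := by rw [hk0, Int.mul_ediv_cancel_left _ hGne]
  rw [hm0'] at hco ⊢
  rw [hk0'] at hco
  constructor
  · intro h
    have h2 : G * m0 ∣ G * (i * k0) := by
      calc G * m0 = n := hm0.symm
        _ ∣ i * k := h
        _ = G * (i * k0) := by rw [hk0] ; ring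
    have h3 : m0 ∣ i * k0 := (mul_dvd_mul_iff_left hGne).mp h2
    exact hco.dvd_of_dvd_mul_right h3
  · intro h
    obtain ⟨t, ht⟩ := h
    exact ⟨t * k0, by rw [hk0, ht, hm0] ; ring⟩

lemma sum_map_range (h : Nat → Int) (m : Nat) :
    ((List.range m).map h).sum = ∑ j ∈ Finset.range m, h j := by
  induction m with
  | zero => simp
  | succ m ih => rw [List.range_succ, Finset.sum_range_succ, List.map_append, List.sum_append, ih] ; simp

theorem solveCloudRevisited_spec : Claim_equal_solveCloudRevisited := by
  intro c n k _ hpre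
  obtain ⟨hn, _⟩ := hpre
  unfold Spec_solveCloudRevisited solveCloudRevisited
  set g : Int := (Int.gcd n k : Int) with hgdef
  have hnne : n ≠ 0 := by omega
  have hgpos : 0 < g := by
    rw [hgdef]
    exact_mod_cast Int.gcd_pos_iff.mpr (Or.inl hnne)
  have hgn : g ∣ n := by rw [hgdef] ; exact Int.gcd_dvd_left n k
  have hgk : g ∣ k := by rw [hgdef] ; exact Int.gcd_dvd_right n k
  set mI : Int := n / g with hmIdef
  have hnfact : g * mI = n := Int.mul_ediv_cancel' hgn
  have hmIpos : 0 < mI := by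
    by_contra h
    push Not at h
    nlinarith [hnfact, hgpos, hn]
  set m : Nat := mI.toNat with hmdef
  have hmcast : (m : Int) = mI := Int.toNat_of_nonneg (by omega)
  have hmpos : 0 < m := by omega
  -- the position after i hops
  set φ : Int → Int := fun i => (i * k) % n with hφdef
  have hφ0 : φ 0 = 0 := by simp [hφdef]
  have hφbd : ∀ i, 0 ≤ φ i ∧ φ i < n := fun i =>
    ⟨Int.emod_nonneg _ hnne, Int.emod_lt_of_pos _ (by omega)⟩
  have hφdvd : ∀ i, g ∣ φ i := by
    intro i
    have : φ i = i * k - n * (i * k / n) := by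
      simp [hφdef, Int.emod_def]
    rw [this]
    exact dvd_sub (Dvd.dvd.mul_left hgk i) (Dvd.dvd.mul_right hgn _)
  have hφzero : ∀ i, φ i = 0 ↔ mI ∣ i := by
    intro i
    rw [hφdef]
    simp only
    rw [PySem.Int.emod_eq_zero_iff_dvd]
    exact pv_dvd_key n k i hnne
  have hφstep : ∀ i, PySem.Int.mod (φ i + k) n = φ (i + 1) := by
    intro i
    rw [PySem.Int.mod_eq_emod_of_pos (by omega)]
    show ((i * k) % n + k) % n = ((i + 1) * k) % n
    rw [Int.emod_add_emod]
    ring_nf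
  -- the penalty at position x
  set f : Int → Int := fun x => if PySem.List.pyGetD c x 0 = 0 then 1 else 3 with hfdef
  -- loop invariant: starting at visit j < m with d = m - j visits left
  have hloop : ∀ d fuel j cnt, j + d = m → 0 < d → d ≤ fuel →
      pvLoopA c n k fuel (φ (j : Int)) cnt
        = cnt + ∑ t ∈ Finset.range d, f (φ ((j : Int) + 1 + t)) := by
    intro d
    induction d with
    | zero => omega
    | succ d ih =>
      intro fuel j cnt hjd _ hfuel
      obtain ⟨fuel', rfl⟩ : ∃ fuel', fuel = fuel' + 1 := ⟨fuel - 1, by omega⟩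
      rw [pvLoopA]
      simp only [hφstep (j : Int)]
      by_cases hd : d = 0
      · -- last visit: j + 1 = m, so φ (j+1) = 0
        subst hd
        have hlast : φ ((j : Int) + 1) = 0 := by
          rw [hφzero]
          have : ((j : Int) + 1) = mI := by omega
          rw [this]
        rw [hlast]
        rw [if_pos rfl, Finset.sum_range_one]
        have he : (j : Int) + 1 + ((0 : Nat) : Int) = (j : Int) + 1 := by push_cast ; ring
        rw [he, hlast]
        simp only [hfdef]
        split <;> ring
      · -- intermediate visit: φ (j+1) ≠ 0
        have hne : φ ((j : Int) + 1) ≠ 0 := by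
          intro h0
          rw [hφzero] at h0
          have hdvd := h0
          have h1 : (0 : Int) < (j : Int) + 1 := by positivity
          have h2 : (j : Int) + 1 < mI := by omega
          have := Int.le_of_dvd h1 hdvd
          omega
      -- fix the cast: φ ((j+1 : Nat) : Int) = φ ((j:Int)+1)
        have hcast : ((j + 1 : Nat) : Int) = (j : Int) + 1 := by push_cast ; ring
        rw [if_neg hne]
        have hrec := ih fuel' (j + 1)
          ((if PySem.List.pyGetD c (φ ((j : Int) + 1)) 0 = 0 then cnt + 1 else cnt + 3))
          (by omega) (by omega) (by omega)
        rw [hcast] at hrec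
        rw [hrec]
        rw [Finset.sum_range_succ' (fun t => f (φ ((j : Int) + 1 + t))) d]
        have hsplit : (if PySem.List.pyGetD c (φ ((j : Int) + 1)) 0 = 0 then cnt + 1 else cnt + 3)
            = cnt + f (φ ((j : Int) + 1)) := by
          simp only [hfdef]
          split <;> ring
        rw [hsplit]
        have hsum : ∑ t ∈ Finset.range d, f (φ ((j : Int) + 1 + 1 + (t : Int)))
            = ∑ t ∈ Finset.range d, f (φ ((j : Int) + 1 + ((t + 1 : Nat) : Int))) := by
          apply Finset.sum_congr rfl
          intro t _
          congr 1
          push_cast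
          ring_nf
        rw [hsum]
        have h0 : f (φ ((j : Int) + 1 + ((0 : Nat) : Int))) = f (φ ((j : Int) + 1)) := by
          norm_num
        rw [h0]
        ring
  -- A's loop result
  have hA : pvLoopA c n k (n.toNat + 1) 0 0 = ∑ t ∈ Finset.range m, f (φ (1 + t)) := by
    have hmle : m ≤ n.toNat + 1 := by
      have : mI ≤ n := by
        calc mI = n / g := hmIdef
          _ ≤ n := Int.ediv_le_self _ (by omega)
      omega
    have := hloop m (n.toNat + 1) 0 0 (by omega) hmpos hmle
    rw [show ((0 : Nat) : Int) = 0 from rfl, hφ0] at this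
    rw [this]
    simp
  -- B's range sum
  have hcount : (n - 0 + g - 1) / g = mI := by
    have : n - 0 + g - 1 = (g - 1) + mI * g := by rw [← hnfact] ; ring
    rw [this, Int.add_mul_ediv_right _ _ (by omega : g ≠ 0),
        Int.ediv_eq_zero_of_lt (by omega) (by omega)]
    ring
  have hrange : PySem.List.pyRange 0 n g
      = (List.range m).map (fun t : Nat => (0 : Int) + g * (t : Int)) := by
    rw [PySem.List.pyRange_of_pos 0 n hgpos, if_pos (by omega : (0:Int) < n), hcount]
  have hB : (PySem.List.pyRange 0 n g).foldl
      (fun acc i => acc + (if PySem.List.pyGetD c i 0 = 0 then 1 else 3)) 0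
      = ∑ j ∈ Finset.range m, f (g * (j : Int)) := by
    rw [PySem.List.foldl_add _ (fun i => if PySem.List.pyGetD c i 0 = 0 then (1:Int) else 3) 0,
        hrange, List.map_map, sum_map_range]
    rw [zero_add]
    apply Finset.sum_congr rfl
    intro j _
    simp [hfdef, Function.comp]
  -- the two index sets coincide: {φ (t+1) : t < m} = {g * j : j < m}
  have hinjA : Set.InjOn (fun t : Nat => φ ((t : Int) + 1)) (Finset.range m) := by
    intro t ht t' ht' heq
    simp only [Finset.coe_range, Set.mem_Iio] at ht ht'
    have hdvd : n ∣ ((t : Int) - t') * k := by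
      have h0 : ((((t : Int) + 1) * k) % n) = ((((t' : Int) + 1) * k) % n) := heq
      have := Int.emod_eq_emod_iff_emod_sub_eq_zero.mp h0
      have h1 : n ∣ (((t : Int) + 1) * k - ((t' : Int) + 1) * k) := Int.dvd_of_emod_eq_zero this
      have h2 : (((t : Int) + 1) * k - ((t' : Int) + 1) * k) = ((t : Int) - t') * k := by ring
      rwa [h2] at h1
    have hmdvd : mI ∣ ((t : Int) - t') := (pv_dvd_key n k _ hnne).mp hdvd
    have : ((t : Int) - t') = 0 := Int.eq_zero_of_abs_lt_dvd hmdvd (by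
      rw [abs_lt]
      omega)
    omega
  have hinjB : Set.InjOn (fun j : Nat => g * (j : Int)) (Finset.range m) := by
    intro a _ b _ h
    have : (a : Int) = b := by
      have := mul_left_cancel₀ (by omega : g ≠ 0) h
      exact_mod_cast this
    exact_mod_cast this
  have hsub : (Finset.range m).image (fun t : Nat => φ ((t : Int) + 1))
      ⊆ (Finset.range m).image (fun j : Nat => g * (j : Int)) := by
    intro x hx
    obtain ⟨t, _, rfl⟩ := Finset.mem_image.mp hx
    obtain ⟨hge, hlt⟩ := hφbd ((t : Int) + 1)
    have hgd := hφdvd ((t : Int) + 1)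
    set q : Int := φ ((t : Int) + 1) / g with hqdef
    have hqval : g * q = φ ((t : Int) + 1) := Int.mul_ediv_cancel' hgd
    have hq0 : 0 ≤ q := Int.ediv_nonneg hge (by omega)
    have hqlt : q < mI := by
      rw [hqdef]
      rw [Int.ediv_lt_iff_lt_mul (by omega : (0:Int) < g)]
      nlinarith [hnfact]
    apply Finset.mem_image.mpr
    refine ⟨q.toNat, Finset.mem_range.mpr (by omega), ?_⟩
    rw [Int.toNat_of_nonneg hq0]
    exact hqval
  have himg : (Finset.range m).image (fun t : Nat => φ ((t : Int) + 1))
      = (Finset.range m).image (fun j : Nat => g * (j : Int)) := by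
    apply Finset.eq_of_subset_of_card_le hsub
    rw [Finset.card_image_of_injOn hinjA, Finset.card_image_of_injOn hinjB]
  have hsums : ∑ t ∈ Finset.range m, f (φ ((t : Int) + 1))
      = ∑ j ∈ Finset.range m, f (g * (j : Int)) := by
    rw [← Finset.sum_image hinjA, ← Finset.sum_image hinjB, himg]
  -- assemble
  have halt : solveCloudRevisited_alt c n k
      = 100 - (PySem.List.pyRange 0 n (pvGcd n k)).foldl
          (fun acc i => acc + (if PySem.List.pyGetD c i 0 = 0 then 1 else 3)) 0 := rfl
  rw [hA, halt, pvGcd_eq, ← hgdef, hB]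
  have hshift : ∑ t ∈ Finset.range m, f (φ (1 + (t : Int)))
      = ∑ t ∈ Finset.range m, f (φ ((t : Int) + 1)) := by
    apply Finset.sum_congr rfl
    intro t _
    congr 1
    ring_nf
  rw [hshift, hsums]
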